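-- pv_equiv track=rewrite | github.com/qtpham1998/advent-of-code | 2020/Day16/sixteen.py | identify_fields
-- ===== SOURCE A (Python) =====
-- def check_field_range_validity(ranges, value):
--   """ Whether the value satisfies one of given ranges """
--   return any([lwr <= value <= upr for lwr, upr in ranges])
--
-- def get_rules_validity(rules, value):
--   """ Which rules the value satisfies in form of a dict{rule: bool} """
--   return {rule: check_field_range_validity(ranges, value)
--           for rule, ranges in rules.items()}
--
-- def check_ticket_validity(rules, ticket):
--   """ Whether ticket is valid and the value that doesn't satisfy any rule,
--   if there exist one """
--   fields_validity = [any(get_rules_validity(rules, value).values())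
--             for value in ticket]
--   try:
--     return False, ticket[fields_validity.index(False)]
--   except ValueError:
--     return True, 0
--
-- def filter_fields(rules, nearby_tickets):
--   """ Get possible fields for each position.
--       Returns a list of candidates, indexed by position on the ticket """
--   f_candidates = [set(rules.keys()) for _ in range(len(rules))]
--   nearby_tickets = \
--     filter(lambda t: check_ticket_validity(rules, t)[0], nearby_tickets)
--   for ticket in nearby_tickets:
--     for i, v in enumerate(ticket):
--       rules_validity = get_rules_validity(rules, v)
--       candidates = [p[0] for p in filter(lambda p: p[1],
--                                               rules_validity.items())]
--       f_candidates[i] = f_candidates[i].intersection(set(candidates))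
--   return f_candidates
--
-- def identify_fields(rules, nearby_tickets):
--   fields = filter_fields(rules, nearby_tickets)
--   set_fields = set()
--   n_rules = len(fields)
--   while len(set_fields) < n_rules:
--     for i, f_set in enumerate(fields):
--       if len(f_set) == 1:
--         set_fields = set_fields.union(f_set)
--       else:
--         fields[i] = f_set.difference(set_fields)
--   return {pos: next(iter(rule)) for pos, rule in enumerate(fields)}
-- ===== SOURCE B (Python) =====
-- def identify_fields(rules, nearby_tickets):
--     def ok(ranges, v):
--         return any(lwr <= v <= upr for lwr, upr in ranges)
--
--     valid = [t for t in nearby_tickets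
--              if all(any(ok(rs, v) for rs in rules.values()) for v in t)]
--     n = len(rules)
--     # position-major candidate build: rule r is a candidate for position i iff
--     # every valid ticket long enough to have a field i satisfies r there
--     cands = [[r for r, rs in rules.items()
--               if all(ok(rs, t[i]) for t in valid if i < len(t))]
--              for i in range(n)]
--
--     # backtracking search for a system of distinct representatives:
--     # assign positions 0..n-1 in order, trying each still-unused candidate and
--     # recursing; under a uniquely solvable input the matching found is THE one
--     def dfs(i, used):
--         if i == n:
--             return []
--         for r in cands[i]:
--             if r not in used:
--                 sub = dfs(i + 1, used | {r})
--                 if sub is not None: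
--                     return [r] + sub
--         return None
--
--     sol = dfs(0, frozenset())
--     return {i: sol[i] for i in range(n)}
-- ===== Notes on version B (the rewrite author's own statement) =====
-- stated objective: alternative
-- what changed: B resolves the position-to-rule assignment by recursive backtracking search for a system of distinct representatives (DFS over positions, trying each unused candidate and undoing on failure) instead of A's constraint-propagation loop that repeatedly sweeps mutable candidate sets, collecting singletons and subtracting them until stable; B also builds candidates position-major by filtering rules against all valid tickets rather than A's ticket-major intersection of sets.
import Mathlib
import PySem

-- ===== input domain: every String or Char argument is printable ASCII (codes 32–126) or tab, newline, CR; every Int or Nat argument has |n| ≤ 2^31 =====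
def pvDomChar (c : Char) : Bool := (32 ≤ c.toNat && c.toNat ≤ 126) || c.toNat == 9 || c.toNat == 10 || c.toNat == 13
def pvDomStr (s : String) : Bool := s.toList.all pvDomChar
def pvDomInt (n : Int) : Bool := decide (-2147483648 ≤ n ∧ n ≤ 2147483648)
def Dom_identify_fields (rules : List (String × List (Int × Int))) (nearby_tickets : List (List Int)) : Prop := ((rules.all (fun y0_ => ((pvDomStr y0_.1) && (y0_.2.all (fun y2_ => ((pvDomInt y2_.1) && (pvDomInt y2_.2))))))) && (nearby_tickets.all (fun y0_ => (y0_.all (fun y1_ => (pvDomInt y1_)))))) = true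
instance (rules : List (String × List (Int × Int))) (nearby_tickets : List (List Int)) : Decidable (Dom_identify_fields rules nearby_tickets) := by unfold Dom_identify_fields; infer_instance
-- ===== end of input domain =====

-- B replaces A's sweep-until-stable singleton elimination by a recursive backtracking search for a
-- system of distinct representatives over position-major candidate lists (objective: alternative).


-- ===== PORT A =====
def check_field_range_validity (ranges : List (Int × Int)) (value : Int) : Bool :=
  (ranges.map (fun p => decide (p.1 ≤ value ∧ value ≤ p.2))).any (fun b => b)

-- get_rules_validity: dict {rule: bool} in rule order (the Lean 'rules' assoc list stands for a
-- Python dict, so we read it through PySem.Dict.ofList everywhere)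
def get_rules_validity (rules : List (String × List (Int × Int))) (value : Int) :
    PySem.Dict String Bool :=
  PySem.Dict.ofList ((PySem.Dict.ofList rules).items.map (fun p => (p.1, check_field_range_validity p.2 value)))

def check_ticket_validity (rules : List (String × List (Int × Int))) (ticket : List Int) :
    Bool × Int :=
  let fields_validity := ticket.map (fun value => (get_rules_validity rules value).values.any (fun b => b))
  match PySem.List.index? fields_validity false with
  | some i => (false, ticket.getD i 0)
  | none => (true, 0)

-- f_candidates[i] = f_candidates[i].intersection(set(candidates)); an enumerate index i beyond
-- len(f_candidates) is Python's IndexError (excluded by Pre_; List.set is then a no-op)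
def filter_fields (rules : List (String × List (Int × Int))) (nearby_tickets : List (List Int)) :
    List (PySem.Set String) :=
  let d := PySem.Dict.ofList rules
  let f0 : List (PySem.Set String) := (List.range d.size).map (fun _ => PySem.Set.ofList d.keys)
  let valids := nearby_tickets.filter (fun t => (check_ticket_validity rules t).1)
  valids.foldl (fun fc ticket =>
    (PySem.List.enumerate ticket 0).foldl (fun fc iv =>
      let rules_validity := get_rules_validity rules iv.2
      let candidates := (rules_validity.items.filter (fun p => p.2)).map (fun p => p.1)
      fc.set iv.1.toNat (PySem.Set.inter (fc.getD iv.1.toNat []) (PySem.Set.ofList candidates))) fc) f0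

-- one pass of 'for i, f_set in enumerate(fields)'
def aSweep (n : Nat) (st : List (PySem.Set String) × PySem.Set String) :
    List (PySem.Set String) × PySem.Set String :=
  (List.range n).foldl (fun st i =>
    let f_set := st.1.getD i []
    if PySem.Set.len f_set == 1 then (st.1, PySem.Set.union st.2 f_set)
    else (st.1.set i (PySem.Set.diff f_set st.2), st.2)) st

-- 'while len(set_fields) < n_rules', run with fuel 2*n+1: under Pre_ the loop provably stabilises
-- within that many sweeps (outside Pre_ the Python while loop never terminates)
def aLoop (n : Nat) : Nat → (List (PySem.Set String) × PySem.Set String) →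
    (List (PySem.Set String) × PySem.Set String)
  | 0, st => st
  | fuel+1, st => if st.2.length < n then aLoop n fuel (aSweep n st) else st

-- next(iter(rule)) of a singleton set is its sole element (under Pre_ every final set is a singleton;
-- outside Pre_ the Python never reaches this line)
def identify_fields (rules : List (String × List (Int × Int))) (nearby_tickets : List (List Int)) :
    List (Int × String) :=
  let fields := filter_fields rules nearby_tickets
  let n_rules := fields.length
  let st := aLoop n_rules (2 * n_rules + 1) (fields, [])
  (PySem.List.enumerate st.1 0).map (fun p => (p.1, p.2.headD ""))

-- ===== PORT B =====
-- helpers shared by the port of B and by Pre_ (which states solvability over the same candidates)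
def okRanges (ranges : List (Int × Int)) (v : Int) : Bool :=
  ranges.any (fun p => decide (p.1 ≤ v) && decide (v ≤ p.2))

def validTicket (rules : List (String × List (Int × Int))) (t : List Int) : Bool :=
  t.all (fun v => (PySem.Dict.ofList rules).values.any (fun rs => okRanges rs v))

def candsOf (rules : List (String × List (Int × Int))) (nearby_tickets : List (List Int)) :
    List (List String) :=
  let d := PySem.Dict.ofList rules
  let valid := nearby_tickets.filter (validTicket rules)
  (List.range d.size).map (fun i =>
    (d.items.filter (fun p =>
      valid.all (fun t => !(decide (i < t.length)) || okRanges p.2 (t.getD i 0)))).map (fun p => p.1))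

-- 'def dfs(i, used)', recursion over the remaining candidate lists: 'for r in cands[i]:
-- if r not in used: sub = dfs(i+1, used | {r}); if sub is not None: return [r] + sub'
def pvDFS : List (List String) → PySem.Set String → Option (List String)
  | [], _ => some []
  | c :: rest, used =>
      c.findSome? (fun r =>
        if PySem.Set.contains used r then none
        else (pvDFS rest (PySem.Set.add used r)).map (fun sub => r :: sub))

-- Python's 'sol[i]' when dfs returned None raises TypeError, reached only outside Pre_;
-- the port reads through getD there
def identify_fields_alt (rules : List (String × List (Int × Int)))
    (nearby_tickets : List (List Int)) : List (Int × String) :=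
  let n := (PySem.Dict.ofList rules).size
  let cands := candsOf rules nearby_tickets
  let sol := (pvDFS cands PySem.Set.empty).getD []
  (List.range n).map (fun (i : Nat) => ((i : Int), sol.getD i ""))

-- ===== PRECONDITION & SPEC =====
-- the first pending position whose candidates minus the already-chosen rules are one rule
def pvPeelStep (cands : List (List String)) (pending : List Nat) (used : List String) :
    Option (Nat × String) :=
  pending.findSome? (fun p =>
    match (cands.getD p []).filter (fun r => !(used.contains r)) with
    | [r] => some (p, r)
    | _ => none)

-- 'the candidate lists are solvable by successive elimination of uniquely determined positions';
-- the Nat argument is exactly |pending| (each round settles one position), kept structural so the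
-- condition evaluates by 'decide'
def pvSolvable (cands : List (List String)) : Nat → List Nat → List String → Bool
  | 0, pending, _ => pending.isEmpty
  | m + 1, pending, used =>
    match pvPeelStep cands pending used with
    | some pr => pvSolvable cands m (pending.erase pr.1) (used ++ [pr.2])
    | none => pending.isEmpty

-- Pre_ holds exactly where Python A returns normally: every valid nearby ticket has at most
-- len(rules) fields (otherwise A raises IndexError building candidates), and the per-position
-- candidate lists are solvable by successive elimination of uniquely determined positions
-- (otherwise A's while loop never terminates).
def Pre_identify_fields (rules : List (String × List (Int × Int)))
    (nearby_tickets : List (List Int)) : Prop :=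
  (∀ t ∈ nearby_tickets, validTicket rules t = true → t.length ≤ (PySem.Dict.ofList rules).size)
  ∧ pvSolvable (candsOf rules nearby_tickets) (candsOf rules nearby_tickets).length
      (List.range (candsOf rules nearby_tickets).length) [] = true

instance (rules : List (String × List (Int × Int))) (nearby_tickets : List (List Int)) :
    Decidable (Pre_identify_fields rules nearby_tickets) := by
  unfold Pre_identify_fields; infer_instance

def pvWitness_identify_fields : (List (String × List (Int × Int))) × List (List Int) :=
  ([("a", [(0, 5)]), ("b", [(6, 9)])], [[3, 7]])

def Spec_identify_fields (rules : List (String × List (Int × Int)))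
    (nearby_tickets : List (List Int)) (out : List (Int × String)) : Prop :=
  out = identify_fields_alt rules nearby_tickets

instance (rules : List (String × List (Int × Int))) (nearby_tickets : List (List Int))
    (out : List (Int × String)) : Decidable (Spec_identify_fields rules nearby_tickets out) := by
  unfold Spec_identify_fields; infer_instance

-- ===== CLAIM (what is proved, stated in full; the proofs are below) =====
def Claim_equal_identify_fields : Prop := ∀ (rules : List (String × List (Int × Int))) (nearby_tickets : List (List Int)), Dom_identify_fields rules nearby_tickets → Pre_identify_fields rules nearby_tickets → Spec_identify_fields rules nearby_tickets (identify_fields rules nearby_tickets)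

-- ===== LEMMAS AND PROOFS =====

-- 'the elimination succeeds': along the order perm, every position's candidates minus the
-- already-chosen rules are exactly one rule
def peelAlong (cands : List (List String)) (perm : List Nat) : Option (List String) :=
  perm.foldl (fun used? i => used?.bind (fun used =>
    match (cands.getD i []).filter (fun r => !(used.contains r)) with
    | [r] => some (used ++ [r])
    | _ => none)) (some [])

/-- A list none of whose elements occurs among its predecessors has no duplicates. -/
lemma pv_nodup_of_not_mem_take (l : List String)
    (h : ∀ k (hk : k < l.length), l[k] ∉ l.take k) : l.Nodup := by
  induction l with
  | nil => simp
  | cons x t ih =>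
    refine List.nodup_cons.2 ⟨?_, ih ?_⟩
    · intro hx
      rcases List.mem_iff_getElem.1 hx with ⟨k, hk, hkx⟩
      have := h (k + 1) (by simpa using Nat.succ_lt_succ hk)
      simp only [List.getElem_cons_succ, hkx] at this
      exact this (by simp [List.take_succ_cons])
    · intro k hk hmem
      have := h (k + 1) (by simpa using Nat.succ_lt_succ hk)
      simp only [List.getElem_cons_succ] at this
      exact this (by simp [List.take_succ_cons, hmem])

/-- A duplicate-free list whose members are all equal to its member `a` is `[a]`. -/
lemma pv_eq_singleton_of_nodup {α : Type} (l : List α) (a : α) (hnd : l.Nodup)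
    (ha : a ∈ l) (hall : ∀ x ∈ l, x = a) : l = [a] := by
  cases l with
  | nil => simp at ha
  | cons x t =>
    have hx : x = a := hall x (by simp)
    subst hx
    have : t = [] := by
      cases t with
      | nil => rfl
      | cons y u =>
        have hy : y = x := hall y (by simp)
        subst hy
        simp at hnd
    simp [this]

/-- A list of length one containing `a` is `[a]`. -/
lemma pv_eq_singleton_of_length_one {α : Type} (l : List α) (a : α)
    (hl : l.length = 1) (ha : a ∈ l) : l = [a] := by
  cases l with
  | nil => simp at ha
  | cons x t =>
    have : t = [] := by simpa using hl
    subst this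
    simp at ha
    simp [ha]

/-- Strict `countP` growth: pointwise implication plus one strict witness. -/
lemma pv_countP_lt {α : Type} (l : List α) (p q : α → Bool)
    (hmono : ∀ x ∈ l, p x = true → q x = true) (a : α) (ha : a ∈ l)
    (hpa : p a = false) (hqa : q a = true) : l.countP p < l.countP q := by
  induction l with
  | nil => simp at ha
  | cons x t ih =>
    rcases List.mem_cons.1 ha with rfl | hat
    · have ht : t.countP p ≤ t.countP q :=
        List.countP_mono_left (fun x hx => hmono x (List.mem_cons_of_mem _ hx))
      simp [hpa, hqa]; omega
    · have hx := hmono x (by simp)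
      have ht : t.countP p < t.countP q :=
        ih (fun y hy => hmono y (List.mem_cons_of_mem _ hy)) hat
      by_cases hpx : p x = true
      · simp [hpx, hx hpx]; omega
      · have : p x = false := by simpa using hpx
        simp [List.countP_cons, this]
        rcases Bool.eq_false_or_eq_true (q x) with h | h <;> simp [h] <;> omega

/-- Nodup subset gives a length bound. -/
lemma pv_length_le_of_nodup_subset {α : Type} (l t : List α) (hnd : l.Nodup)
    (hsub : l ⊆ t) : l.length ≤ t.length :=
  (List.subperm_of_subset hnd hsub).length_le

/-- Strict version: some element of `t` is missing from `l`. -/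
lemma pv_length_lt_of_nodup_ssubset {α : Type} (l t : List α) (hnd : l.Nodup)
    (hsub : l ⊆ t) (a : α) (hat : a ∈ t) (hal : a ∉ l) : l.length < t.length := by
  have h1 : (l ++ [a]).Nodup := by
    refine hnd.append (by simp) ?_
    intro x hx hxa
    simp at hxa
    exact hal (hxa ▸ hx)
  have h2 : (l ++ [a]) ⊆ t := by
    intro x hx
    rcases List.mem_append.1 hx with h | h
    · exact hsub h
    · simp at h; simpa [h]
  have := pv_length_le_of_nodup_subset _ _ h1 h2
  simp at this; omega

lemma pv_peel_none (cands : List (List String)) (perm : List Nat) :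
    perm.foldl (fun used? i => used?.bind (fun used =>
      match (cands.getD i []).filter (fun r => !(used.contains r)) with
      | [r] => some (used ++ [r])
      | _ => none)) none = none := by
  induction perm with
  | nil => rfl
  | cons i t ih => simpa using ih

lemma pv_peel_sound (cands : List (List String)) : ∀ (perm : List Nat) (acc used : List String),
    perm.foldl (fun used? i => used?.bind (fun used =>
      match (cands.getD i []).filter (fun r => !(used.contains r)) with
      | [r] => some (used ++ [r])
      | _ => none)) (some acc) = some used →
    used.length = acc.length + perm.length ∧ (∃ rest, used = acc ++ rest) ∧
    ∀ k (hk : k < perm.length),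
      (cands.getD perm[k] []).filter (fun r => !((used.take (acc.length + k)).contains r))
        = [(used[acc.length + k]?).getD ""] := by
  intro perm
  induction perm with
  | nil =>
    intro acc used h
    simp only [List.foldl_nil, Option.some.injEq] at h
    subst h
    exact ⟨by simp, ⟨[], by simp⟩, by intro k hk; simp at hk⟩
  | cons i t ih =>
    intro acc used h
    simp only [List.foldl_cons] at h
    have h' : t.foldl (fun used? i => used?.bind (fun used =>
      match (cands.getD i []).filter (fun r => !(used.contains r)) with
      | [r] => some (used ++ [r])
      | _ => none))
        (match (cands.getD i []).filter (fun r => !(acc.contains r)) with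
         | [r] => some (acc ++ [r])
         | _ => none) = some used := h
    cases hf : (cands.getD i []).filter (fun r => !(acc.contains r)) with
    | nil =>
      rw [hf] at h'
      rw [pv_peel_none] at h'
      exact absurd h' (by simp)
    | cons r rt =>
      cases rt with
      | cons r2 rt2 =>
        rw [hf] at h'
        rw [pv_peel_none] at h'
        exact absurd h' (by simp)
      | nil =>
        rw [hf] at h'
        obtain ⟨hlen, ⟨rest, hpre⟩, hstep⟩ := ih (acc ++ [r]) used h'
        refine ⟨by simp only [List.length_append, List.length_cons, List.length_nil] at hlen ⊢; omega, ⟨[r] ++ rest, by rw [hpre, List.append_assoc]⟩, ?_⟩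
        intro k hk
        cases k with
        | zero =>
          subst hpre
          have h1 : ((acc ++ [r]) ++ rest).take (acc.length + 0) = acc := by
            rw [List.append_assoc]
            simpa using List.take_append_of_le_length (by simp)
          have h2 : (((acc ++ [r]) ++ rest)[acc.length + 0]?).getD "" = r := by
            rw [List.append_assoc]
            rw [List.getElem?_append_right (by simp)]
            simp
          rw [h1, h2]
          simpa using hf
        | succ k' =>
          have hk' : k' < t.length := by simpa using hk
          have := hstep k' hk'
          have harith : (acc ++ [r]).length + k' = acc.length + (k' + 1) := by
            simp; omega
          rw [harith] at this
          simpa using this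

/-- A certificate for the elimination: `σ` assigns each position its rule, and along the order
`perm` each position's candidates minus the previously chosen rules are exactly `[σ i]`. -/
structure Cert (cands : List (List String)) (σ : Nat → String) (perm : List Nat) : Prop where
  hperm : perm.Perm (List.range cands.length)
  hforce : ∀ k (hk : k < perm.length),
    (cands.getD perm[k] []).filter (fun r => !(((perm.take k).map σ).contains r)) = [σ perm[k]]
  hmem : ∀ i, i < cands.length → σ i ∈ cands.getD i []
  hinj : ∀ i j, i < cands.length → j < cands.length → σ i = σ j → i = j
  hnds : ∀ i, (cands.getD i []).Nodup

lemma pv_cert_of_peel (cands : List (List String))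
    (hnds : ∀ i, (cands.getD i []).Nodup) (perm : List Nat)
    (hp : perm.Perm (List.range cands.length))
    (hsome : (peelAlong cands perm).isSome = true) :
    ∃ σ, Cert cands σ perm := by
  obtain ⟨used, hused⟩ := Option.isSome_iff_exists.1 hsome
  unfold peelAlong at hused
  obtain ⟨hlen0, _, hstep⟩ := pv_peel_sound cands perm [] used hused
  have hlen : used.length = perm.length := by simpa using hlen0
  have hpn : perm.length = cands.length := hp.length_eq.trans (by simp)
  have hstep' : ∀ k (hk : k < perm.length),
      (cands.getD perm[k] []).filter (fun r => !((used.take k).contains r))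
        = [used[k]'(by omega)] := by
    intro k hk
    have := hstep k hk
    simpa [List.getElem?_eq_getElem (show k < used.length by omega)] using this
  have hmemf : ∀ k (hk : k < perm.length), used[k]'(by omega) ∈
      (cands.getD perm[k] []).filter (fun r => !((used.take k).contains r)) := by
    intro k hk; rw [hstep' k hk]; simp
  have hUsedNodup : used.Nodup := by
    apply pv_nodup_of_not_mem_take
    intro k hk
    have := List.of_mem_filter (hmemf k (by omega))
    simpa using this
  have hPermNodup : perm.Nodup := (hp.nodup_iff).2 List.nodup_range
  refine ⟨fun i => (PySem.Dict.mk (perm.zip used)).getD i "", ?_⟩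
  have hkeys : (PySem.Dict.mk (perm.zip used)).keys = perm := by
    simp only [PySem.Dict.keys]
    exact List.map_fst_zip (by omega)
  have hσat : ∀ k (hk : k < perm.length),
      (PySem.Dict.mk (perm.zip used)).getD perm[k] "" = used[k]'(by omega) := by
    intro k hk
    apply PySem.Dict.getD_of_mem_items
    · have hz : (perm.zip used)[k]'(by simp [List.length_zip]; omega) =
          (perm[k], used[k]'(by omega)) := List.getElem_zip ..
      rw [← hz]; exact List.getElem_mem _
    · rw [hkeys]; exact hPermNodup
  have htake : ∀ k, k ≤ perm.length →
      (perm.take k).map (fun i => (PySem.Dict.mk (perm.zip used)).getD i "") = used.take k := by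
    intro k hkk
    apply List.ext_getElem (by simp [List.length_take]; omega)
    intro j h1 h2
    simp only [List.getElem_map, List.getElem_take]
    exact hσat j (by simp [List.length_take] at h1; omega)
  have hmemi : ∀ i, i < cands.length → ∃ k, ∃ (hk : k < perm.length), perm[k] = i := by
    intro i hi
    have : i ∈ perm := (hp.mem_iff).2 (List.mem_range.2 hi)
    exact List.mem_iff_getElem.1 this
  refine ⟨hp, ?_, ?_, ?_, hnds⟩
  · intro k hk
    rw [htake k (by omega), hstep' k hk, hσat k hk]
  · intro i hi
    obtain ⟨k, hk, hki⟩ := hmemi i hi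
    rw [← hki, hσat k hk]
    exact List.mem_of_mem_filter (hmemf k hk)
  · intro i j hi hj hσ
    obtain ⟨k, hk, hki⟩ := hmemi i hi
    obtain ⟨m, hm, hmj⟩ := hmemi j hj
    rw [← hki, ← hmj, hσat k hk, hσat m hm] at hσ
    have hkm : k = m := (hUsedNodup.getElem_inj_iff).1 hσ
    subst hkm
    exact hki.symm.trans hmj

-- ---- B side: soundness, completeness and uniqueness of the backtracking search ----

/-- Everything `pvDFS` returns is a matching: pointwise membership, no duplicates, disjoint
from `used`. -/
lemma pv_dfs_sound : ∀ (rest : List (List String)) (used sol : List String),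
    pvDFS rest used = some sol →
    List.Forall₂ (fun r c => r ∈ c) sol rest ∧ sol.Nodup ∧ ∀ x ∈ sol, x ∉ used := by
  intro rest
  induction rest with
  | nil =>
    intro used sol h
    simp only [pvDFS, Option.some.injEq] at h
    subst h
    simp
  | cons c rest ih =>
    intro used sol h
    simp only [pvDFS] at h
    obtain ⟨r, hr, hfr⟩ := List.exists_of_findSome?_eq_some h
    cases hc : PySem.Set.contains used r with
    | true => rw [hc] at hfr; simp at hfr
    | false =>
      rw [hc] at hfr
      simp only [Bool.false_eq_true, if_false, Option.map_eq_some_iff] at hfr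
      obtain ⟨sub, hsub, rfl⟩ := hfr
      obtain ⟨hf, hnd, hdis⟩ := ih (PySem.Set.add used r) sub hsub
      have hrused : r ∉ used := by
        intro hm
        rw [(PySem.Set.contains_iff used r).2 hm] at hc
        exact absurd hc (by simp)
      refine ⟨List.Forall₂.cons hr hf, ?_, ?_⟩
      · refine List.nodup_cons.2 ⟨?_, hnd⟩
        intro hm
        exact hdis r hm ((PySem.Set.mem_add used r r).2 (Or.inr rfl))
      · intro x hx
        rcases List.mem_cons.1 hx with rfl | hx
        · exact hrused
        · intro hm
          exact hdis x hx ((PySem.Set.mem_add used r x).2 (Or.inl hm))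

/-- If a matching disjoint from `used` exists, the backtracking search succeeds. -/
lemma pv_dfs_complete : ∀ (rest : List (List String)) (used sol : List String),
    List.Forall₂ (fun r c => r ∈ c) sol rest → sol.Nodup → (∀ x ∈ sol, x ∉ used) →
    (pvDFS rest used).isSome = true := by
  intro rest
  induction rest with
  | nil => intro used sol _ _ _; simp [pvDFS]
  | cons c rest ih =>
    intro used sol hf hnd hdis
    obtain ⟨s, sol', rfl, hs, hf'⟩ :
        ∃ s sol', sol = s :: sol' ∧ s ∈ c ∧ List.Forall₂ (fun r c => r ∈ c) sol' rest := by
      cases hf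
      exact ⟨_, _, rfl, ‹_›, ‹_›⟩
    have hsused : s ∉ used := hdis s (by simp)
    have hnd' := List.nodup_cons.1 hnd
    have hrec : (pvDFS rest (PySem.Set.add used s)).isSome = true := by
      apply ih (PySem.Set.add used s) sol' hf' hnd'.2
      intro x hx hm
      rcases (PySem.Set.mem_add used s x).1 hm with hm | rfl
      · exact hdis x (by simp [hx]) hm
      · exact hnd'.1 hx
    cases hres : pvDFS (c :: rest) used with
    | some v => simp
    | none =>
      exfalso
      simp only [pvDFS, List.findSome?_eq_none_iff] at hres
      have hnone := hres s hs
      have hcf : PySem.Set.contains used s = false := by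
        cases hcc : PySem.Set.contains used s with
        | false => rfl
        | true => exact absurd ((PySem.Set.contains_iff used s).1 hcc) hsused
      rw [if_neg (by rw [hcf]; exact Bool.false_ne_true)] at hnone
      obtain ⟨sub, hsub⟩ := Option.isSome_iff_exists.1 hrec
      rw [hsub] at hnone
      simp at hnone

/-- Under a certificate, ANY matching agrees with `σ` at every position (peel-order induction). -/
lemma pv_matching_at (cands : List (List String)) (σ : Nat → String) (perm : List Nat)
    (C : Cert cands σ perm) (sol : List String) (hlen : sol.length = cands.length)
    (hmem : ∀ i, i < cands.length → sol.getD i "" ∈ cands.getD i []) (hnd : sol.Nodup) :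
    ∀ k, k < perm.length → sol.getD (perm.getD k 0) "" = σ (perm.getD k 0) := by
  have hplen : perm.length = cands.length := C.hperm.length_eq.trans (by simp)
  have hPermNodup : perm.Nodup := (C.hperm.nodup_iff).2 List.nodup_range
  have hidx : ∀ k (hk : k < perm.length), perm.getD k 0 = perm[k] := by
    intro k hk
    rw [List.getD_eq_getElem?_getD, List.getElem?_eq_getElem hk, Option.getD_some]
  have hin : ∀ k (hk : k < perm.length), perm[k] < cands.length := by
    intro k hk
    have : perm[k] ∈ perm := List.getElem_mem _
    simpa using (C.hperm.mem_iff).1 this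
  intro k
  induction k using Nat.strong_induction_on with
  | _ k ih =>
    intro hk
    rw [hidx k hk]
    by_cases hmemtake : sol.getD perm[k] "" ∈ (perm.take k).map σ
    · exfalso
      obtain ⟨y, hy, hyx⟩ := List.mem_map.1 hmemtake
      obtain ⟨j, hjlt, hje⟩ := List.mem_iff_getElem.1 hy
      have hjk : j < k := lt_of_lt_of_le hjlt (List.length_take_le k perm)
      have hjlen : j < perm.length := by omega
      have hyperm : y = perm[j] := by rw [← hje, List.getElem_take]
      have hjeq := ih j hjk hjlen
      rw [hidx j hjlen] at hjeq
      have heq : sol.getD perm[j] "" = sol.getD perm[k] "" := by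
        rw [hjeq, ← hyperm, hyx]
      have hjc : perm[j] < sol.length := by rw [hlen]; exact hin j hjlen
      have hkc : perm[k] < sol.length := by rw [hlen]; exact hin k hk
      rw [List.getD_eq_getElem?_getD, List.getElem?_eq_getElem hjc, Option.getD_some,
        List.getD_eq_getElem?_getD, List.getElem?_eq_getElem hkc, Option.getD_some] at heq
      have hpe : perm[j] = perm[k] := (hnd.getElem_inj_iff).1 heq
      have : j = k := (hPermNodup.getElem_inj_iff).1 hpe
      omega
    · have hx : sol.getD perm[k] "" ∈ (cands.getD perm[k] []).filter
          (fun r => !(((perm.take k).map σ).contains r)) := by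
        apply List.mem_filter.2
        refine ⟨hmem _ (hin k hk), ?_⟩
        cases hcx : ((perm.take k).map σ).contains (sol.getD perm[k] "")
        · simp
        · exact absurd ((List.contains_iff_mem).1 hcx) hmemtake
      rw [C.hforce k hk] at hx
      simpa using hx

/-- The matching is unique: any matching equals `(range n).map σ`. -/
lemma pv_matching_eq (cands : List (List String)) (σ : Nat → String) (perm : List Nat)
    (C : Cert cands σ perm) (sol : List String) (hlen : sol.length = cands.length)
    (hmem : ∀ i, i < cands.length → sol.getD i "" ∈ cands.getD i []) (hnd : sol.Nodup) :
    sol = (List.range cands.length).map σ := by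
  have hplen : perm.length = cands.length := C.hperm.length_eq.trans (by simp)
  apply List.ext_getElem (by simp [hlen])
  intro i h1 h2
  have hi : i < cands.length := by simpa using h2
  have : i ∈ perm := (C.hperm.mem_iff).2 (List.mem_range.2 hi)
  obtain ⟨k, hk, hki⟩ := List.mem_iff_getElem.1 this
  have := pv_matching_at cands σ perm C sol hlen hmem hnd k hk
  have hgd : perm.getD k 0 = perm[k] := by
    rw [List.getD_eq_getElem?_getD, List.getElem?_eq_getElem hk, Option.getD_some]
  rw [hgd, hki] at this
  rw [List.getD_eq_getElem?_getD, List.getElem?_eq_getElem h1, Option.getD_some] at this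
  simp only [List.getElem_map, List.getElem_range]
  exact this

lemma pv_getD_getElem {α : Type} (l : List α) (d : α) (i : Nat) (h : i < l.length) :
    l.getD i d = l[i] := by
  rw [List.getD_eq_getElem?_getD, List.getElem?_eq_getElem h, Option.getD_some]

lemma pv_forall₂_of_getD (cands : List (List String)) (sol : List String)
    (hlen : sol.length = cands.length)
    (hmem : ∀ i, i < cands.length → sol.getD i "" ∈ cands.getD i []) :
    List.Forall₂ (fun r c => r ∈ c) sol cands := by
  rw [List.forall₂_iff_get]
  refine ⟨hlen, ?_⟩
  intro i h1 h2
  have := hmem i h2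
  rw [pv_getD_getElem sol "" i h1, pv_getD_getElem cands [] i h2] at this
  simpa using this

lemma pv_getD_of_forall₂ (cands : List (List String)) (sol : List String)
    (hf : List.Forall₂ (fun r c => r ∈ c) sol cands) :
    ∀ i, i < cands.length → sol.getD i "" ∈ cands.getD i [] := by
  have h := List.forall₂_iff_get.1 hf
  intro i hi
  have h1 : i < sol.length := by rw [h.1]; exact hi
  have := h.2 i h1 hi
  rw [pv_getD_getElem sol "" i h1, pv_getD_getElem cands [] i hi]
  simpa using this

lemma pv_sigma_nodup (cands : List (List String)) (σ : Nat → String) (perm : List Nat)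
    (C : Cert cands σ perm) : ((List.range cands.length).map σ).Nodup := by
  refine List.Nodup.map_on ?_ List.nodup_range
  intro x hx y hy hxy
  exact C.hinj x y (List.mem_range.1 hx) (List.mem_range.1 hy) hxy

lemma pv_alt_eq (rules : List (String × List (Int × Int))) (nearby_tickets : List (List Int))
    (σ : Nat → String) (perm : List Nat) (C : Cert (candsOf rules nearby_tickets) σ perm) :
    identify_fields_alt rules nearby_tickets =
      (List.range (candsOf rules nearby_tickets).length).map (fun (i : Nat) => ((i : Int), σ i)) := by
  set cands := candsOf rules nearby_tickets with hcands
  have hn : (PySem.Dict.ofList rules).size = cands.length := by simp [hcands, candsOf]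
  have hwnd : ((List.range cands.length).map σ).Nodup := pv_sigma_nodup cands σ perm C
  have hwmem : ∀ i, i < cands.length →
      ((List.range cands.length).map σ).getD i "" ∈ cands.getD i [] := by
    intro i hi
    have : ((List.range cands.length).map σ).getD i "" = σ i := by
      rw [List.getD_eq_getElem?_getD, List.getElem?_eq_getElem (by simpa using hi)]
      simp
    rw [this]
    exact C.hmem i hi
  have hwf : List.Forall₂ (fun r c => r ∈ c) ((List.range cands.length).map σ) cands :=
    pv_forall₂_of_getD cands _ (by simp) hwmem
  cases hdfs : pvDFS cands PySem.Set.empty with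
  | none =>
    exfalso
    have := pv_dfs_complete cands PySem.Set.empty _ hwf hwnd
      (by intro x _ hm; simp [PySem.Set.empty] at hm)
    rw [hdfs] at this
    simp at this
  | some sol =>
    obtain ⟨hf, hnd, _⟩ := pv_dfs_sound cands PySem.Set.empty sol hdfs
    have hlen : sol.length = cands.length := hf.length_eq
    have hsol : sol = (List.range cands.length).map σ :=
      pv_matching_eq cands σ perm C sol hlen (pv_getD_of_forall₂ cands sol hf) hnd
    simp only [identify_fields_alt, ← hcands, hdfs, Option.getD_some, hn]
    apply List.map_congr_left
    intro i hi
    have : sol.getD i "" = σ i := by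
      rw [hsol, List.getD_eq_getElem?_getD,
        List.getElem?_eq_getElem (by simpa using List.mem_range.1 hi)]
      simp
    rw [this]

/-- The body of one step of A's sweep (named for the proofs; `aSweep` folds it). -/
def aStepF (st : List (PySem.Set String) × PySem.Set String) (i : Nat) :
    List (PySem.Set String) × PySem.Set String :=
  let f_set := st.1.getD i []
  if PySem.Set.len f_set == 1 then (st.1, PySem.Set.union st.2 f_set)
  else (st.1.set i (PySem.Set.diff f_set st.2), st.2)

lemma pv_aSweep_eq (n : Nat) (st : List (PySem.Set String) × PySem.Set String) :
    aSweep n st = (List.range n).foldl aStepF st := rfl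

lemma pv_len_beq (s : List String) : (PySem.Set.len s == 1) = true ↔ s.length = 1 := by
  simp [PySem.Set.len]

lemma pv_getD_set_self (l : List (PySem.Set String)) (i : Nat) (v : PySem.Set String)
    (h : i < l.length) : (l.set i v).getD i [] = v := by
  rw [List.getD_eq_getElem?_getD, List.getElem?_set_self h]; rfl

lemma pv_getD_set_ne (l : List (PySem.Set String)) (i j : Nat) (v : PySem.Set String)
    (h : i ≠ j) : (l.set i v).getD j [] = l.getD j [] := by
  rw [List.getD_eq_getElem?_getD, List.getElem?_set_ne h, ← List.getD_eq_getElem?_getD]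

/-- Invariant of A's sweep state `(fields, set_fields)`. -/
def InvA (cands : List (List String)) (σ : Nat → String)
    (st : List (PySem.Set String) × PySem.Set String) : Prop :=
  st.1.length = cands.length ∧ st.2.Nodup ∧
  (∀ i, i < cands.length → σ i ∈ st.1.getD i [] ∧ (∀ x ∈ st.1.getD i [], x ∈ cands.getD i [])
    ∧ (st.1.getD i []).Nodup) ∧
  (∀ r ∈ st.2, ∃ j, j < cands.length ∧ r = σ j ∧ (st.1.getD j []).length = 1)

lemma pv_stepA (cands : List (List String)) (σ : Nat → String) (perm : List Nat)
    (C : Cert cands σ perm) (st : List (PySem.Set String) × PySem.Set String) (i : Nat)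
    (hi : i < cands.length) (hinv : InvA cands σ st) :
    InvA cands σ (aStepF st i) ∧
    (∀ r ∈ st.2, r ∈ (aStepF st i).2) ∧
    (∀ j, (st.1.getD j []).length = 1 → (aStepF st i).1.getD j [] = st.1.getD j []) ∧
    (∀ j, j ≠ i → (aStepF st i).1.getD j [] = st.1.getD j []) := by
  obtain ⟨hlen, hnd2, hinv3, hinv4⟩ := hinv
  by_cases hone : (st.1.getD i []).length = 1
  · have hcond : (PySem.Set.len (st.1.getD i []) == 1) = true := (pv_len_beq _).2 hone
    have hstep : aStepF st i = (st.1, PySem.Set.union st.2 (st.1.getD i [])) := by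
      simp only [aStepF]
      rw [if_pos hcond]
    have hfi : st.1.getD i [] = [σ i] :=
      pv_eq_singleton_of_length_one _ _ hone (hinv3 i hi).1
    rw [hstep]
    refine ⟨⟨hlen, PySem.Set.nodup_union _ _ hnd2, hinv3, ?_⟩, ?_, ?_, ?_⟩
    · intro r hr
      rcases (PySem.Set.mem_union _ _ _).1 hr with hr | hr
      · exact hinv4 r hr
      · rw [hfi] at hr
        simp at hr
        exact ⟨i, hi, hr, hone⟩
    · intro r hr
      exact (PySem.Set.mem_union _ _ _).2 (Or.inl hr)
    · intro j _; rfl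
    · intro j _; rfl
  · have hcond : (PySem.Set.len (st.1.getD i []) == 1) = false := by
      cases hc : (PySem.Set.len (st.1.getD i []) == 1)
      · rfl
      · exact absurd ((pv_len_beq _).1 hc) hone
    have hstep : aStepF st i
        = (st.1.set i (PySem.Set.diff (st.1.getD i []) st.2), st.2) := by
      simp only [aStepF]
      rw [if_neg (by rw [hcond]; exact Bool.false_ne_true)]
    have hσnotin : σ i ∉ st.2 := by
      intro hmem
      obtain ⟨j, hj, hje, hjl⟩ := hinv4 _ hmem
      have : i = j := C.hinj i j hi hj hje
      rw [← this] at hjl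
      exact hone hjl
    have hdmem : ∀ x, x ∈ PySem.Set.diff (st.1.getD i []) st.2 ↔
        x ∈ st.1.getD i [] ∧ x ∉ st.2 := fun x => PySem.Set.mem_diff ..
    rw [hstep]
    have hset_self : (st.1.set i (PySem.Set.diff (st.1.getD i []) st.2)).getD i []
        = PySem.Set.diff (st.1.getD i []) st.2 :=
      pv_getD_set_self _ _ _ (by omega)
    refine ⟨⟨by simpa using hlen, hnd2, ?_, ?_⟩, fun r hr => hr, ?_, ?_⟩
    · intro j hj
      by_cases hji : j = i
      · subst hji
        rw [hset_self]
        refine ⟨(hdmem _).2 ⟨(hinv3 j hj).1, hσnotin⟩, ?_, ?_⟩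
        · intro x hx
          exact (hinv3 j hj).2.1 x ((hdmem x).1 hx).1
        · have : PySem.Set.diff (st.1.getD j []) st.2
              = (st.1.getD j []).filter (fun x => !(st.2.contains x)) := rfl
          rw [this]
          exact List.Nodup.filter _ (hinv3 j hj).2.2
      · rw [pv_getD_set_ne _ _ _ _ (fun h => hji h.symm)]
        exact hinv3 j hj
    · intro r hr
      obtain ⟨j, hj, hje, hjl⟩ := hinv4 r hr
      by_cases hji : j = i
      · subst hji
        exact absurd hjl hone
      · exact ⟨j, hj, hje, by rwa [pv_getD_set_ne _ _ _ _ (fun h => hji h.symm)]⟩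
    · intro j hj1
      by_cases hji : j = i
      · subst hji; exact absurd hj1 hone
      · exact pv_getD_set_ne _ _ _ _ (fun h => hji h.symm)
    · intro j hj
      exact pv_getD_set_ne _ _ _ _ (fun h => hj h.symm)

lemma pv_foldA (cands : List (List String)) (σ : Nat → String) (perm : List Nat)
    (C : Cert cands σ perm) : ∀ (l : List Nat) (st : List (PySem.Set String) × PySem.Set String),
    (∀ x ∈ l, x < cands.length) → InvA cands σ st →
    InvA cands σ (l.foldl aStepF st) ∧
    (∀ r ∈ st.2, r ∈ (l.foldl aStepF st).2) ∧
    (∀ j, (st.1.getD j []).length = 1 → (l.foldl aStepF st).1.getD j [] = st.1.getD j []) ∧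
    (∀ j, j ∉ l → (l.foldl aStepF st).1.getD j [] = st.1.getD j []) := by
  intro l
  induction l with
  | nil => intro st _ hinv; exact ⟨hinv, fun r hr => hr, fun j _ => rfl, fun j _ => rfl⟩
  | cons i t ih =>
    intro st hl hinv
    have hi : i < cands.length := hl i (by simp)
    obtain ⟨hinv1, hmono1, hsing1, huntouched1⟩ := pv_stepA cands σ perm C st i hi hinv
    obtain ⟨hinv2, hmono2, hsing2, huntouched2⟩ :=
      ih (aStepF st i) (fun x hx => hl x (by simp [hx])) hinv1
    simp only [List.foldl_cons]
    refine ⟨hinv2, fun r hr => hmono2 r (hmono1 r hr), ?_, ?_⟩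
    · intro j hj1
      rw [hsing2 j (by rw [hsing1 j hj1]; exact hj1), hsing1 j hj1]
    · intro j hj
      have hjt : j ∉ t := fun h => hj (by simp [h])
      have hji : j ≠ i := fun h => hj (by simp [h])
      rw [huntouched2 j hjt, huntouched1 j hji]

lemma pv_sf_le (cands : List (List String)) (σ : Nat → String) (perm : List Nat)
    (C : Cert cands σ perm) (st : List (PySem.Set String) × PySem.Set String)
    (hinv : InvA cands σ st) : st.2.length ≤ cands.length := by
  have hmapnd : ((List.range cands.length).map σ).Nodup := by
    refine List.Nodup.map_on ?_ List.nodup_range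
    intro x hx y hy hxy
    exact C.hinj x y (List.mem_range.1 hx) (List.mem_range.1 hy) hxy
  have hsub : st.2 ⊆ (List.range cands.length).map σ := by
    intro r hr
    obtain ⟨j, hj, hje, _⟩ := hinv.2.2.2 r hr
    exact List.mem_map.2 ⟨j, List.mem_range.2 hj, hje.symm⟩
  have := pv_length_le_of_nodup_subset _ _ hinv.2.1 hsub
  simpa using this

lemma pv_range_split (n i : Nat) (hi : i < n) :
    ∃ s t, List.range n = s ++ i :: t ∧ i ∉ s ∧ i ∉ t ∧
      (∀ x ∈ s, x < n) ∧ (∀ x ∈ t, x < n) := by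
  obtain ⟨s, t, hst⟩ := List.mem_iff_append.1 (List.mem_range.2 hi)
  have hnd : (s ++ i :: t).Nodup := hst ▸ List.nodup_range
  have hnis : i ∉ s := fun h => (List.disjoint_of_nodup_append hnd) h (by simp)
  have hnit : i ∉ t := by
    have := (List.Nodup.of_append_right hnd)
    simp at this
    exact this.1
  refine ⟨s, t, hst, hnis, hnit, ?_, ?_⟩
  · intro x hx
    exact List.mem_range.1 (hst ▸ (List.mem_append.2 (Or.inl hx)))
  · intro x hx
    exact List.mem_range.1 (hst ▸ (List.mem_append.2 (Or.inr (by simp [hx]))))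

lemma pv_sweep_progress (cands : List (List String)) (σ : Nat → String) (perm : List Nat)
    (C : Cert cands σ perm) (st : List (PySem.Set String) × PySem.Set String)
    (hinv : InvA cands σ st) (hlt : st.2.length < cands.length) :
    (List.range cands.length).countP (fun i => (st.1.getD i []).length == 1) + st.2.length <
    (List.range cands.length).countP
      (fun i => ((aSweep cands.length st).1.getD i []).length == 1)
      + (aSweep cands.length st).2.length := by
  rw [pv_aSweep_eq]
  have hplen : perm.length = cands.length := C.hperm.length_eq.trans (by simp)
  by_cases hc : ∃ i, i < cands.length ∧ (st.1.getD i []).length = 1 ∧ σ i ∉ st.2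
  · -- some already-singleton position is not yet collected: set_fields grows
    obtain ⟨i, hi, hone, hnotin⟩ := hc
    obtain ⟨s, t, hst, hnis, hnit, hsn, htn⟩ := pv_range_split cands.length i hi
    rw [hst, List.foldl_append, List.foldl_cons]
    obtain ⟨hinv1, hmono1, hsing1, hun1⟩ := pv_foldA cands σ perm C s st hsn hinv
    set st1 := s.foldl aStepF st with hst1
    have hv1 : st1.1.getD i [] = st.1.getD i [] := hun1 i hnis
    have hone1 : (st1.1.getD i []).length = 1 := by rw [hv1]; exact hone
    obtain ⟨hinv2, hmono2, hsing2, hun2⟩ := pv_stepA cands σ perm C st1 i hi hinv1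
    have hcond : (PySem.Set.len (st1.1.getD i []) == 1) = true := (pv_len_beq _).2 hone1
    have hstep : aStepF st1 i = (st1.1, PySem.Set.union st1.2 (st1.1.getD i [])) := by
      simp only [aStepF]
      rw [if_pos hcond]
    obtain ⟨hinv3, hmono3, hsing3, hun3⟩ :=
      pv_foldA cands σ perm C t (aStepF st1 i) htn hinv2
    set fin := t.foldl aStepF (aStepF st1 i) with hfin
    have hσin : σ i ∈ fin.2 := by
      apply hmono3
      rw [hstep]
      apply (PySem.Set.mem_union _ _ _).2
      right
      rw [hv1]
      exact (hinv.2.2.1 i hi).1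
    have hsub : st.2 ⊆ fin.2 := by
      intro r hr
      exact hmono3 r (hmono2 r (hmono1 r hr))
    have hsf : st.2.length < fin.2.length :=
      pv_length_lt_of_nodup_ssubset _ _ hinv.2.1 hsub (σ i) hσin hnotin
    have hcount : (s ++ i :: t).countP (fun k => (st.1.getD k []).length == 1)
        ≤ (s ++ i :: t).countP (fun k => (fin.1.getD k []).length == 1) := by
      apply List.countP_mono_left
      intro x _ hx
      have hx1 : (st.1.getD x []).length = 1 := by simpa using hx
      have e1 : st1.1.getD x [] = st.1.getD x [] := hsing1 x hx1
      have e2 : (aStepF st1 i).1.getD x [] = st1.1.getD x [] := hsing2 x (by rw [e1]; exact hx1)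
      have e3 : fin.1.getD x [] = (aStepF st1 i).1.getD x [] :=
        hsing3 x (by rw [e2, e1]; exact hx1)
      simp only [hfin] at *
      rw [e3, e2, e1]
      exact hx
    omega
  · -- all singleton positions are already collected: a new singleton appears
    push_neg at hc
    have hex : ∃ k, k < perm.length ∧ (st.1.getD (perm.getD k 0) []).length ≠ 1 := by
      by_contra hall
      push_neg at hall
      have hallsing : ∀ i, i < cands.length → (st.1.getD i []).length = 1 := by
        intro i hi
        have : i ∈ perm := (C.hperm.mem_iff).2 (List.mem_range.2 hi)
        obtain ⟨k, hk, he⟩ := List.mem_iff_getElem.1 this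
        have hgd : perm.getD k 0 = perm[k] := by
          rw [List.getD_eq_getElem?_getD, List.getElem?_eq_getElem hk, Option.getD_some]
        have := hall k hk
        rwa [hgd, he] at this
      have hsub : (List.range cands.length).map σ ⊆ st.2 := by
        intro r hr
        obtain ⟨j, hj, hje⟩ := List.mem_map.1 hr
        have hjn := List.mem_range.1 hj
        rw [← hje]
        exact hc j hjn (hallsing j hjn)
      have hmapnd : ((List.range cands.length).map σ).Nodup := by
        refine List.Nodup.map_on ?_ List.nodup_range
        intro x hx y hy hxy
        exact C.hinj x y (List.mem_range.1 hx) (List.mem_range.1 hy) hxy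
      have := pv_length_le_of_nodup_subset _ _ hmapnd hsub
      simp at this
      omega
    have hk0 : Nat.find hex < perm.length := (Nat.find_spec hex).1
    have hk0ne : (st.1.getD (perm.getD (Nat.find hex) 0) []).length ≠ 1 := (Nat.find_spec hex).2
    set i0 : Nat := perm.getD (Nat.find hex) 0 with hi0def
    have hi0eq : i0 = perm[Nat.find hex] := by
      rw [hi0def, List.getD_eq_getElem?_getD, List.getElem?_eq_getElem hk0, Option.getD_some]
    have hi0lt : i0 < cands.length := by
      have : i0 ∈ perm := by rw [hi0eq]; exact List.getElem_mem _
      simpa using (C.hperm.mem_iff).1 this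
    obtain ⟨s, t, hst, hnis, hnit, hsn, htn⟩ := pv_range_split cands.length i0 hi0lt
    rw [hst, List.foldl_append, List.foldl_cons]
    obtain ⟨hinv1, hmono1, hsing1, hun1⟩ := pv_foldA cands σ perm C s st hsn hinv
    set st1 := s.foldl aStepF st with hst1
    have hv1 : st1.1.getD i0 [] = st.1.getD i0 [] := hun1 i0 hnis
    have hone1 : (st1.1.getD i0 []).length ≠ 1 := by rw [hv1]; exact hk0ne
    have hcond : (PySem.Set.len (st1.1.getD i0 []) == 1) = false := by
      cases hcc : (PySem.Set.len (st1.1.getD i0 []) == 1)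
      · rfl
      · exact absurd ((pv_len_beq _).1 hcc) hone1
    have hstep : aStepF st1 i0
        = (st1.1.set i0 (PySem.Set.diff (st1.1.getD i0 []) st1.2), st1.2) := by
      simp only [aStepF]
      rw [if_neg (by rw [hcond]; exact Bool.false_ne_true)]
    -- the value written at i0 is exactly [σ i0]
    have hσnotin1 : σ i0 ∉ st1.2 := by
      intro hmem
      obtain ⟨j, hj, hje, hjl⟩ := hinv1.2.2.2 _ hmem
      have : i0 = j := C.hinj i0 j hi0lt hj hje
      rw [← this] at hjl
      exact hone1 hjl
    have htakein : ∀ x ∈ (perm.take (Nat.find hex)).map σ, x ∈ st1.2 := by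
      intro x hx
      obtain ⟨y, hy, hyx⟩ := List.mem_map.1 hx
      obtain ⟨j, hjlt, hje⟩ := List.mem_iff_getElem.1 hy
      have hjk : j < Nat.find hex :=
        lt_of_lt_of_le hjlt (List.length_take_le (Nat.find hex) perm)
      have hjlen : j < perm.length := by omega
      have hyperm : y = perm[j] := by rw [← hje, List.getElem_take]
      have hjsing : (st.1.getD perm[j] []).length = 1 := by
        have hgd : perm.getD j 0 = perm[j] := by
          rw [List.getD_eq_getElem?_getD, List.getElem?_eq_getElem hjlen, Option.getD_some]
        have := Nat.find_min hex hjk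
        simp only [not_and, not_not] at this
        have h2 := this hjlen
        rwa [hgd] at h2
      have hjn : perm[j] < cands.length := by
        have : perm[j] ∈ perm := List.getElem_mem _
        simpa using (C.hperm.mem_iff).1 this
      have : σ perm[j] ∈ st.2 := hc perm[j] hjn hjsing
      rw [← hyperm, hyx] at this
      exact hmono1 x this
    have hdiff : PySem.Set.diff (st1.1.getD i0 []) st1.2 = [σ i0] := by
      have hndi : (st1.1.getD i0 []).Nodup := (hinv1.2.2.1 i0 hi0lt).2.2
      have hdifffilter : PySem.Set.diff (st1.1.getD i0 []) st1.2
          = (st1.1.getD i0 []).filter (fun x => !(st1.2.contains x)) := rfl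
      apply pv_eq_singleton_of_nodup _ _ (by rw [hdifffilter]; exact List.Nodup.filter _ hndi)
      · exact (PySem.Set.mem_diff ..).2 ⟨(hinv1.2.2.1 i0 hi0lt).1, hσnotin1⟩
      · intro x hx
        obtain ⟨hx1, hx2⟩ := (PySem.Set.mem_diff ..).1 hx
        have hxc : x ∈ cands.getD i0 [] := (hinv1.2.2.1 i0 hi0lt).2.1 x hx1
        have hxcert : x ∈ (cands.getD perm[Nat.find hex] []).filter
            (fun r => !(((perm.take (Nat.find hex)).map σ).contains r)) := by
          apply List.mem_filter.2
          refine ⟨by rwa [← hi0eq], ?_⟩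
          cases hcx : ((perm.take (Nat.find hex)).map σ).contains x
          · simp
          · exact absurd (htakein x ((List.contains_iff_mem).1 hcx)) hx2
        rw [C.hforce (Nat.find hex) hk0] at hxcert
        simp at hxcert
        rw [hi0eq]
        exact hxcert
    obtain ⟨hinv2, hmono2, hsing2, hun2⟩ := pv_stepA cands σ perm C st1 i0 hi0lt hinv1
    obtain ⟨hinv3, hmono3, hsing3, hun3⟩ :=
      pv_foldA cands σ perm C t (aStepF st1 i0) htn hinv2
    set fin := t.foldl aStepF (aStepF st1 i0) with hfin
    have hi0len : i0 < st1.1.length := by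
      rw [hinv1.1]; exact hi0lt
    have hati0 : (aStepF st1 i0).1.getD i0 [] = [σ i0] := by
      rw [hstep]
      simp only
      rw [pv_getD_set_self _ _ _ hi0len, hdiff]
    have hfini0 : fin.1.getD i0 [] = [σ i0] := by
      rw [hsing3 i0 (by rw [hati0]; rfl), hati0]
    -- set_fields does not shrink
    have hsfle : st.2.length ≤ fin.2.length := by
      have hsub : st.2 ⊆ fin.2 := by
        intro r hr
        exact hmono3 r (hmono2 r (hmono1 r hr))
      exact pv_length_le_of_nodup_subset _ _ hinv.2.1 hsub
    -- singleton count strictly grows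
    have hcount : (s ++ i0 :: t).countP (fun k => (st.1.getD k []).length == 1) <
        (s ++ i0 :: t).countP (fun k => (fin.1.getD k []).length == 1) := by
      apply pv_countP_lt _ _ _ ?_ i0 (by simp) (by simpa using hk0ne)
        (by rw [hfini0]; rfl)
      intro x _ hx
      have hx1 : (st.1.getD x []).length = 1 := by simpa using hx
      have e1 : st1.1.getD x [] = st.1.getD x [] := hsing1 x hx1
      have e2 : (aStepF st1 i0).1.getD x [] = st1.1.getD x [] := hsing2 x (by rw [e1]; exact hx1)
      have e3 : fin.1.getD x [] = (aStepF st1 i0).1.getD x [] :=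
        hsing3 x (by rw [e2, e1]; exact hx1)
      simp only [hfin] at *
      rw [e3, e2, e1]
      exact hx
    omega

lemma pv_aLoop_done (cands : List (List String)) (σ : Nat → String) (perm : List Nat)
    (C : Cert cands σ perm) : ∀ (fuel : Nat) (st : List (PySem.Set String) × PySem.Set String),
    InvA cands σ st →
    2 * cands.length + 1 ≤ fuel +
      ((List.range cands.length).countP (fun i => (st.1.getD i []).length == 1) + st.2.length) →
    InvA cands σ (aLoop cands.length fuel st) ∧
      (aLoop cands.length fuel st).2.length = cands.length := by
  intro fuel
  induction fuel with
  | zero =>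
    intro st hinv hb
    have h1 : (List.range cands.length).countP (fun i => (st.1.getD i []).length == 1)
        ≤ cands.length := le_trans List.countP_le_length (by simp)
    have h2 := pv_sf_le cands σ perm C st hinv
    omega
  | succ f ih =>
    intro st hinv hb
    by_cases hlt : st.2.length < cands.length
    · have hprog := pv_sweep_progress cands σ perm C st hinv hlt
      have hrange : ∀ x ∈ List.range cands.length, x < cands.length := by
        intro x hx; exact List.mem_range.1 hx
      have hinv' : InvA cands σ (aSweep cands.length st) := by
        rw [pv_aSweep_eq]
        exact (pv_foldA cands σ perm C (List.range cands.length) st hrange hinv).1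
      simp only [aLoop, if_pos hlt]
      exact ih (aSweep cands.length st) hinv' (by omega)
    · have h2 := pv_sf_le cands σ perm C st hinv
      simp only [aLoop, if_neg hlt]
      exact ⟨hinv, by omega⟩

lemma pv_final_fields (cands : List (List String)) (σ : Nat → String) (perm : List Nat)
    (C : Cert cands σ perm) (st : List (PySem.Set String) × PySem.Set String)
    (hinv : InvA cands σ st) (hn : st.2.length = cands.length) :
    ∀ i, i < cands.length → st.1.getD i [] = [σ i] := by
  set M := ((List.range cands.length).filter
    (fun i => (st.1.getD i []).length == 1)).map σ with hM
  have hsub : st.2 ⊆ M := by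
    intro r hr
    obtain ⟨j, hj, hje, hjl⟩ := hinv.2.2.2 r hr
    apply List.mem_map.2
    exact ⟨j, List.mem_filter.2 ⟨List.mem_range.2 hj, by simpa using hjl⟩, hje.symm⟩
  have hMnd : M.Nodup := by
    refine List.Nodup.map_on ?_ (List.Nodup.filter _ List.nodup_range)
    intro x hx y hy hxy
    exact C.hinj x y (List.mem_range.1 (List.mem_of_mem_filter hx))
      (List.mem_range.1 (List.mem_of_mem_filter hy)) hxy
  have hlenM : M.length ≤ cands.length := by
    have := List.length_filter_le (fun i => (st.1.getD i []).length == 1)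
      (List.range cands.length)
    simp only [hM, List.length_map]
    simpa using this
  have hge := pv_length_le_of_nodup_subset _ _ hinv.2.1 hsub
  have hflen : ((List.range cands.length).filter
      (fun i => (st.1.getD i []).length == 1)).length = cands.length := by
    simp only [hM, List.length_map] at hlenM hge
    omega
  have hfeq : (List.range cands.length).filter
      (fun i => (st.1.getD i []).length == 1) = List.range cands.length :=
    List.Sublist.eq_of_length List.filter_sublist (by simpa using hflen)
  intro i hi
  have : i ∈ (List.range cands.length).filter
      (fun i => (st.1.getD i []).length == 1) := by
    rw [hfeq]; exact List.mem_range.2 hi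
  have hone : (st.1.getD i []).length = 1 := by simpa using (List.of_mem_filter this)
  exact pv_eq_singleton_of_length_one _ _ hone (hinv.2.2.1 i hi).1

lemma pv_a_eq (rules : List (String × List (Int × Int))) (nearby_tickets : List (List Int))
    (σ : Nat → String) (perm : List Nat) (C : Cert (candsOf rules nearby_tickets) σ perm)
    (hff : filter_fields rules nearby_tickets = candsOf rules nearby_tickets) :
    identify_fields rules nearby_tickets =
      (List.range (candsOf rules nearby_tickets).length).map
        (fun (i : Nat) => ((i : Int), σ i)) := by
  simp only [identify_fields]
  rw [hff]
  have hinv0 : InvA (candsOf rules nearby_tickets) σ ((candsOf rules nearby_tickets), []) := by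
    refine ⟨rfl, by simp, ?_, by simp⟩
    intro i hi
    exact ⟨C.hmem i hi, fun x hx => hx, C.hnds i⟩
  have hrun := pv_aLoop_done _ σ perm C (2 * (candsOf rules nearby_tickets).length + 1)
    ((candsOf rules nearby_tickets), []) hinv0 (by omega)
  have hfields := pv_final_fields _ σ perm C _ hrun.1 hrun.2
  set st := aLoop (candsOf rules nearby_tickets).length
    (2 * (candsOf rules nearby_tickets).length + 1) ((candsOf rules nearby_tickets), []) with hstdef
  have hstlen : st.1.length = (candsOf rules nearby_tickets).length := hrun.1.1
  apply List.ext_getElem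
  · simp [hstlen]
  · intro k h1 h2
    have hk : k < (candsOf rules nearby_tickets).length := by simpa using h2
    have hk1 : k < st.1.length := by rw [hstlen]; exact hk
    have he : (PySem.List.enumerate st.1 0)[k]'(by simpa [PySem.List.length_enumerate] using hk1)
        = ((0 : Int) + k, st.1[k]) := PySem.List.getElem_enumerate ..
    have hv : st.1[k] = [σ k] := by
      have := hfields k hk
      rwa [List.getD_eq_getElem?_getD, List.getElem?_eq_getElem hk1, Option.getD_some] at this
    simp only [List.getElem_map, he, hv]
    simp

lemma pv_dict_ofList_items {ν : Type} (l : List (String × ν))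
    (h : (l.map (fun p => p.1)).Nodup) : (PySem.Dict.ofList l).items = l := by
  have h0 : ∀ a ∈ l, (PySem.Dict.empty : PySem.Dict String ν).contains a.1 = false := by
    intro a _
    rfl
  have := PySem.Dict.items_foldl_insert_fresh l (fun p => p.1) (fun p => p.2)
    PySem.Dict.empty h0 h
  simpa [PySem.Dict.ofList, PySem.Dict.update, PySem.Dict.empty] using this

lemma pv_gr_items (rules : List (String × List (Int × Int))) (v : Int) :
    (get_rules_validity rules v).items
      = (PySem.Dict.ofList rules).items.map
          (fun p => (p.1, check_field_range_validity p.2 v)) := by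
  apply pv_dict_ofList_items
  have : ((PySem.Dict.ofList rules).items.map
      (fun p => (p.1, check_field_range_validity p.2 v))).map (fun p => p.1)
      = (PySem.Dict.ofList rules).items.map (fun p => p.1) := by
    rw [List.map_map]; rfl
  rw [this]
  exact PySem.Dict.nodup_keys_ofList rules

lemma pv_check_eq (ranges : List (Int × Int)) (v : Int) :
    check_field_range_validity ranges v = okRanges ranges v := by
  simp only [check_field_range_validity, okRanges, List.any_map]
  congr 1
  funext p
  by_cases h1 : p.1 ≤ v <;> by_cases h2 : v ≤ p.2 <;> simp [h1, h2]

lemma pv_fv_eq (rules : List (String × List (Int × Int))) (v : Int) :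
    ((get_rules_validity rules v).values.any (fun b => b))
      = ((PySem.Dict.ofList rules).values.any (fun rs => okRanges rs v)) := by
  simp only [PySem.Dict.values, pv_gr_items, List.map_map, List.any_map]
  congr 1
  funext x
  simp only [Function.comp_apply]
  exact pv_check_eq _ _

lemma pv_valid_eq (rules : List (String × List (Int × Int))) (t : List Int) :
    (check_ticket_validity rules t).1 = validTicket rules t := by
  simp only [check_ticket_validity, validTicket]
  cases hidx : PySem.List.index?
      (t.map (fun value => (get_rules_validity rules value).values.any (fun b => b))) false with
  | none =>
    have hnone := (PySem.List.index?_eq_none_iff ..).1 hidx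
    simp only []
    symm
    rw [List.all_eq_true]
    intro v hv
    cases hval : (PySem.Dict.ofList rules).values.any (fun rs => okRanges rs v) with
    | true => rfl
    | false =>
      exfalso
      apply hnone
      apply List.mem_map.2
      exact ⟨v, hv, by rw [pv_fv_eq, hval]⟩
  | some i =>
    have hmem : false ∈ t.map (fun value =>
        (get_rules_validity rules value).values.any (fun b => b)) := by
      have := PySem.List.index?_isSome_iff
        (xs := t.map (fun value => (get_rules_validity rules value).values.any (fun b => b)))
        (v := false)
      rw [hidx] at this
      simpa using this
    obtain ⟨v, hv, hvf⟩ := List.mem_map.1 hmem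
    simp only []
    symm
    rw [List.all_eq_false]
    refine ⟨v, hv, ?_⟩
    rw [← pv_fv_eq, hvf]
    simp

lemma pv_key_mem_filter {ν : Type} (l : List (String × ν))
    (hnd : (l.map (fun p => p.1)).Nodup) (R : (String × ν) → Bool)
    (p : String × ν) (hp : p ∈ l) :
    (PySem.Set.contains ((l.filter R).map (fun p => p.1)) p.1) = R p := by
  cases hR : R p with
  | true =>
    exact (List.contains_iff_mem).2 (List.mem_map.2 ⟨p, List.mem_filter.2 ⟨hp, hR⟩, rfl⟩)
  | false =>
    cases hcx : PySem.Set.contains ((l.filter R).map (fun p => p.1)) p.1 with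
    | false => rfl
    | true =>
      exfalso
      obtain ⟨q, hq, hq1⟩ := List.mem_map.1 ((List.contains_iff_mem).1 hcx)
      obtain ⟨hql, hqR⟩ := List.mem_filter.1 hq
      have : q = p := List.inj_on_of_nodup_map hnd hql hp hq1
      rw [this] at hqR
      rw [hqR] at hR
      exact absurd hR (by simp)

lemma pv_inter_filter {ν : Type} (l : List (String × ν))
    (hnd : (l.map (fun p => p.1)).Nodup) (Q R : (String × ν) → Bool) :
    PySem.Set.inter ((l.filter Q).map (fun p => p.1))
      (PySem.Set.ofList ((l.filter R).map (fun p => p.1)))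
      = (l.filter (fun p => Q p && R p)).map (fun p => p.1) := by
  have hsubnd : ((l.filter R).map (fun p => p.1)).Nodup :=
    List.Nodup.sublist (List.Sublist.map _ List.filter_sublist) hnd
  have hofl : PySem.Set.ofList ((l.filter R).map (fun p => p.1))
      = (l.filter R).map (fun p => p.1) :=
    PySem.Set.ofList_eq_self_of_nodup _ hsubnd
  have hinter : ∀ (a b : PySem.Set String),
      PySem.Set.inter a b = a.filter (fun x => PySem.Set.contains b x) := fun a b => rfl
  rw [hinter, hofl, List.filter_map, List.filter_filter]
  apply congrArg (List.map _)
  apply List.filter_congr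
  intro p hp
  have := pv_key_mem_filter l hnd R p hp
  simp only [Function.comp]
  rw [this]
  exact Bool.and_comm _ _

lemma pv_candidates_eq (rules : List (String × List (Int × Int))) (v : Int) :
    ((get_rules_validity rules v).items.filter (fun p => p.2)).map (fun p => p.1)
      = ((PySem.Dict.ofList rules).items.filter
          (fun p => okRanges p.2 v)).map (fun p => p.1) := by
  rw [pv_gr_items, List.filter_map, List.map_map]
  apply congrArg₂ _ rfl
  apply List.filter_congr
  intro p _
  simp [Function.comp, pv_check_eq]

/-- One step of A's inner loop over `enumerate(ticket)` (named for the proofs). -/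
def tickStep (rules : List (String × List (Int × Int)))
    (fc : List (PySem.Set String)) (iv : Int × Int) : List (PySem.Set String) :=
  fc.set iv.1.toNat (PySem.Set.inter (fc.getD iv.1.toNat [])
    (PySem.Set.ofList (((get_rules_validity rules iv.2).items.filter
      (fun p => p.2)).map (fun p => p.1))))

lemma pv_tickfold (rules : List (String × List (Int × Int))) (t : List Int) :
    ∀ (s : Nat) (fc : List (PySem.Set String)),
    ((PySem.List.enumerate t (s : Int)).foldl (tickStep rules) fc).length = fc.length ∧
    ∀ (j : Nat), j < fc.length →
      ((PySem.List.enumerate t (s : Int)).foldl (tickStep rules) fc).getD j []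
        = if s ≤ j ∧ j < s + t.length
          then PySem.Set.inter (fc.getD j [])
            (PySem.Set.ofList (((get_rules_validity rules (t.getD (j - s) 0)).items.filter
              (fun p => p.2)).map (fun p => p.1)))
          else fc.getD j [] := by
  induction t with
  | nil =>
    intro s fc
    refine ⟨by simp [PySem.List.enumerate], ?_⟩
    intro j hj
    rw [if_neg (by simp only [List.length_nil]; omega)]
    simp [PySem.List.enumerate]
  | cons v tv ih =>
    intro s fc
    rw [PySem.List.enumerate_cons]
    have hcast : ((s : Int) + 1) = ((s + 1 : Nat) : Int) := by push_cast; ring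
    rw [hcast]
    simp only [List.foldl_cons]
    set fc' := tickStep rules fc ((s : Int), v) with hfc'
    have hfc'len : fc'.length = fc.length := by
      simp [hfc', tickStep]
    obtain ⟨ihlen, ihget⟩ := ih (s + 1) fc'
    refine ⟨by rw [ihlen, hfc'len], ?_⟩
    intro j hj
    have hj' : j < fc'.length := by rw [hfc'len]; exact hj
    rw [ihget j hj']
    simp only [List.length_cons]
    by_cases hjs : j = s
    · subst hjs
      rw [if_neg (by omega), if_pos (by omega)]
      have hval : fc'.getD j [] = PySem.Set.inter (fc.getD j [])
          (PySem.Set.ofList (((get_rules_validity rules v).items.filter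
            (fun p => p.2)).map (fun p => p.1))) := by
        simp only [hfc', tickStep, Int.toNat_natCast]
        exact pv_getD_set_self _ _ _ hj
      rw [hval]
      simp
    · have hfc'j : fc'.getD j [] = fc.getD j [] := by
        simp only [hfc', tickStep, Int.toNat_natCast]
        exact pv_getD_set_ne _ _ _ _ (fun h => hjs h.symm)
      rw [hfc'j]
      by_cases hcond : s + 1 ≤ j ∧ j < s + 1 + tv.length
      · rw [if_pos hcond, if_pos (by omega)]
        have harith : j - s = (j - (s + 1)) + 1 := by omega
        rw [harith]
        simp
      · rw [if_neg hcond, if_neg (by omega)]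

lemma pv_outer (rules : List (String × List (Int × Int))) (n : Nat) :
    ∀ (ts : List (List Int)) (Q : Nat → (String × List (Int × Int)) → Bool),
    (∀ t ∈ ts, t.length ≤ n) →
    ts.foldl (fun fc ticket => (PySem.List.enumerate ticket 0).foldl (tickStep rules) fc)
        ((List.range n).map (fun i =>
          ((((PySem.Dict.ofList rules).items.filter (Q i)).map (fun p => p.1)) : PySem.Set String)))
      = (List.range n).map (fun i =>
          ((((PySem.Dict.ofList rules).items.filter
            (fun p => Q i p && ts.all (fun t => !(decide (i < t.length))
              || okRanges p.2 (t.getD i 0)))).map (fun p => p.1)) : PySem.Set String)) := by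
  intro ts
  induction ts with
  | nil =>
    intro Q _
    simp only [List.foldl_nil, List.all_nil]
    apply List.map_congr_left
    intro i _
    apply congrArg (List.map _)
    apply List.filter_congr
    intro p _
    simp
  | cons t ts ih =>
    intro Q hlen
    simp only [List.foldl_cons]
    have htlen : t.length ≤ n := hlen t (by simp)
    have hstep : (PySem.List.enumerate t (0 : Int)).foldl (tickStep rules)
        ((List.range n).map (fun i =>
          ((((PySem.Dict.ofList rules).items.filter (Q i)).map (fun p => p.1)) : PySem.Set String)))
        = (List.range n).map (fun i =>
          ((((PySem.Dict.ofList rules).items.filter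
            (fun p => Q i p && (!(decide (i < t.length))
              || okRanges p.2 (t.getD i 0)))).map (fun p => p.1)) : PySem.Set String)) := by
      set fc0 := (List.range n).map (fun i =>
        ((((PySem.Dict.ofList rules).items.filter (Q i)).map (fun p => p.1)) : PySem.Set String))
        with hfc0
      have hfc0len : fc0.length = n := by simp [hfc0]
      have hget : ∀ (F : Nat → PySem.Set String) (j : Nat), j < n →
          ((List.range n).map F).getD j [] = F j := by
        intro F j hjn
        rw [List.getD_eq_getElem?_getD, List.getElem?_eq_getElem (by simp; omega)]
        simp
      have hz : ((0 : Nat) : Int) = (0 : Int) := by norm_num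
      obtain ⟨hflen, hfget⟩ := pv_tickfold rules t 0 fc0
      rw [hz] at hflen hfget
      apply List.ext_getElem (by rw [hflen, hfc0len]; simp)
      intro j h1 h2
      have hjn : j < n := by simpa using h2
      have hgd : ∀ (l : List (PySem.Set String)) (h : j < l.length), l[j] = l.getD j [] := by
        intro l h
        rw [List.getD_eq_getElem?_getD, List.getElem?_eq_getElem h]
        rfl
      rw [hgd _ h1, hgd _ h2, hfget j (by rw [hfc0len]; exact hjn)]
      rw [hget _ j hjn]
      by_cases hjt : j < t.length
      · rw [if_pos (by omega)]
        rw [hget _ j hjn]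
        rw [pv_candidates_eq rules, pv_inter_filter _ (PySem.Dict.nodup_keys_ofList rules)]
        apply congrArg (List.map _)
        apply List.filter_congr
        intro p _
        simp only [Nat.sub_zero]
        rw [decide_eq_true hjt]
        simp
      · rw [if_neg (by omega)]
        rw [hget _ j hjn]
        apply congrArg (List.map _)
        apply List.filter_congr
        intro p _
        have : decide (j < t.length) = false := by simp [hjt]
        rw [this]
        simp
    rw [hstep, ih _ (fun t' ht' => hlen t' (by simp [ht']))]
    apply List.map_congr_left
    intro i _
    apply congrArg (List.map _)
    apply List.filter_congr
    intro p _
    simp only [List.all_cons]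
    rw [Bool.and_assoc]

lemma pv_candsOf_getD_nodup (rules : List (String × List (Int × Int)))
    (nearby_tickets : List (List Int)) :
    ∀ i, ((candsOf rules nearby_tickets).getD i []).Nodup := by
  intro i
  by_cases hi : i < (candsOf rules nearby_tickets).length
  · rw [List.getD_eq_getElem?_getD, List.getElem?_eq_getElem hi]
    have hi' : i < (PySem.Dict.ofList rules).size := by simpa [candsOf] using hi
    simp only [candsOf, List.getElem_map, List.getElem_range, Option.getD_some]
    exact List.Nodup.sublist (List.Sublist.map _ List.filter_sublist)
      (PySem.Dict.nodup_keys_ofList rules)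
  · rw [List.getD_eq_getElem?_getD, List.getElem?_eq_none (by omega)]
    simp

lemma pv_filter_fields_eq (rules : List (String × List (Int × Int)))
    (nearby_tickets : List (List Int))
    (hlen : ∀ t ∈ nearby_tickets, validTicket rules t = true →
      t.length ≤ (PySem.Dict.ofList rules).size) :
    filter_fields rules nearby_tickets = candsOf rules nearby_tickets := by
  simp only [filter_fields, candsOf]
  have hfilter : nearby_tickets.filter (fun t => (check_ticket_validity rules t).1)
      = nearby_tickets.filter (validTicket rules) :=
    List.filter_congr (fun t _ => pv_valid_eq rules t)
  rw [hfilter]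
  have hlam : (fun (fc : List (PySem.Set String)) (ticket : List Int) =>
      (PySem.List.enumerate ticket 0).foldl (fun fc iv =>
        let rules_validity := get_rules_validity rules iv.2
        let candidates := (rules_validity.items.filter (fun p => p.2)).map (fun p => p.1)
        fc.set iv.1.toNat (PySem.Set.inter (fc.getD iv.1.toNat [])
          (PySem.Set.ofList candidates))) fc)
      = (fun (fc : List (PySem.Set String)) (ticket : List Int) =>
          (PySem.List.enumerate ticket 0).foldl (tickStep rules) fc) := rfl
  rw [hlam]
  have hf0 : ((List.range (PySem.Dict.ofList rules).size).map
      (fun _ => PySem.Set.ofList (PySem.Dict.ofList rules).keys))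
      = (List.range (PySem.Dict.ofList rules).size).map (fun i =>
          ((((PySem.Dict.ofList rules).items.filter (fun _ => true)).map
            (fun p => p.1)) : PySem.Set String)) := by
    apply List.map_congr_left
    intro i _
    rw [List.filter_true,
      PySem.Set.ofList_eq_self_of_nodup _ (PySem.Dict.nodup_keys_ofList rules)]
    rfl
  rw [hf0]
  rw [pv_outer rules ((PySem.Dict.ofList rules).size)
    (nearby_tickets.filter (validTicket rules)) (fun _ _ => true)
    (fun t ht => hlen t (List.mem_filter.1 ht).1 (by simpa using (List.mem_filter.1 ht).2))]
  apply List.map_congr_left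
  intro i _
  apply congrArg (List.map _)
  apply List.filter_congr
  intro p _
  simp

lemma pv_peelStep_spec (cands : List (List String)) (pending : List Nat) (used : List String)
    (pr : Nat × String) (h : pvPeelStep cands pending used = some pr) :
    pr.1 ∈ pending ∧
      (cands.getD pr.1 []).filter (fun r => !(used.contains r)) = [pr.2] := by
  unfold pvPeelStep at h
  obtain ⟨a, ha, hfa⟩ := List.exists_of_findSome?_eq_some h
  cases hfl : (cands.getD a []).filter (fun r => !(used.contains r)) with
  | nil => rw [hfl] at hfa; simp at hfa
  | cons r rt =>
    cases rt with
    | cons r2 rt2 => rw [hfl] at hfa; simp at hfa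
    | nil =>
      rw [hfl] at hfa
      simp only [Option.some.injEq] at hfa
      subst hfa
      exact ⟨ha, hfl⟩

lemma pv_solvable_sound (cands : List (List String)) :
    ∀ (n : Nat) (pending : List Nat) (used : List String), pending.length ≤ n →
    pvSolvable cands n pending used = true →
    ∃ perm : List Nat, perm.Perm pending ∧
      (perm.foldl (fun used? i => used?.bind (fun used =>
        match (cands.getD i []).filter (fun r => !(used.contains r)) with
        | [r] => some (used ++ [r])
        | _ => none)) (some used)).isSome = true := by
  intro n
  induction n with
  | zero =>
    intro pending used _ hs
    have : pending = [] := by simpa [pvSolvable] using hs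
    subst this
    exact ⟨[], List.Perm.refl _, by simp⟩
  | succ m ih =>
    intro pending used hlen hs
    rw [pvSolvable] at hs
    split at hs
    · rename_i pr hstep
      obtain ⟨hmem, hfl⟩ := pv_peelStep_spec cands pending used pr hstep
      have hlen' : (pending.erase pr.1).length ≤ m := by
        have h1 := List.length_erase_of_mem hmem
        have h2 : pending.length ≠ 0 := by
          intro h0
          rw [List.length_eq_zero_iff.1 h0] at hmem
          simp at hmem
        omega
      obtain ⟨perm', hperm', hfold'⟩ := ih (pending.erase pr.1) (used ++ [pr.2]) hlen' hs
      refine ⟨pr.1 :: perm', ?_, ?_⟩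
      · exact (hperm'.cons pr.1).trans (List.perm_cons_erase hmem).symm
      · simp only [List.foldl_cons, Option.bind_some, hfl]
        exact hfold'
    · rename_i hstep
      have : pending = [] := by simpa using hs
      subst this
      exact ⟨[], List.Perm.refl _, by simp⟩

-- ===== VERDICT (by name: the statement is the Claim_ definition above) =====
theorem identify_fields_spec : Claim_equal_identify_fields := by
  intro rules nearby_tickets _ hpre
  obtain ⟨hlen, hsolv⟩ := hpre
  unfold Spec_identify_fields
  obtain ⟨perm, hperm, hsome⟩ := pv_solvable_sound (candsOf rules nearby_tickets)
    (candsOf rules nearby_tickets).length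
    (List.range (candsOf rules nearby_tickets).length) [] (by simp) hsolv
  have hperm' : perm.Perm (List.range (candsOf rules nearby_tickets).length) := by
    simpa using hperm
  have hsome' : (peelAlong (candsOf rules nearby_tickets) perm).isSome = true := hsome
  obtain ⟨σ, C⟩ := pv_cert_of_peel _ (pv_candsOf_getD_nodup rules nearby_tickets) perm hperm' hsome'
  rw [pv_a_eq rules nearby_tickets σ perm C (pv_filter_fields_eq rules nearby_tickets hlen)]
  exact (pv_alt_eq rules nearby_tickets σ perm C).symm
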